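-- pv_equiv track=rewrite | github.com/talipovm/vbt3 | vbt3/functions.py | standardize_det
-- ===== SOURCE A (Python) =====
-- def place_low(s, i):
--     """
--     Flips two characters in the string to place the next available lower-case character at i-th position.
--     E.g. place_low('aBcD',1) will return 'acBD'
--     Parameters
--     ----------
--     s: a string containing upper and lower case characters
--     i: position in the string
--
--     Returns
--     -------
--     a list containing two elements:
--     1) new string
--     2) 1 if the flip was performed; 0 otherwise
--     """
--     new_s = s
--     if new_s[i].islower():  # alpha-orbital, no swap needed;
--         return new_s, 0
--     else:
--         j = 1
--         while new_s[i + j].isupper():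
--             j += 1
--         new_s = new_s[:i] + new_s[i + j] + new_s[i + 1:i + j] + new_s[i] + new_s[i + j + 1:]
--         return new_s, 1
--
-- def place_high(s, i):
--     """
--     Flips two characters in the string to place the next available upper-case character at i-th position.
--     E.g. place_low('aBcD',0) will return 'BacD'
--     Parameters
--     ----------
--     s: a string containing upper and lower case characters
--     i: position in the string
--
--     Returns
--     -------
--     a list containing two elements:
--     1) new string
--     2) 1 if the flip was performed; 0 otherwise
--     """
--     new_s = s
--     if new_s[i].isupper():  # beta-orbital, no swap needed;
--         return new_s, 0
--     else:
--         j = 1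
--         while new_s[i + j].islower():
--             j += 1
--         new_s = new_s[:i] + new_s[i + j] + new_s[i + 1:i + j] + new_s[i] + new_s[i + j + 1:]
--         return new_s, 1
--
-- def standardize_det(s):
--     """
--     Rearranges the orbitals in a given determinat string to the standard format,
--     that is 'uLuLuL', 'uLuLuLuuu' or 'uLuLuLLLL'
--     Parameters
--     ----------
--     s: determinant string
--
--     Returns
--     -------
--     1) Determinant string in a standard format
--     2) Number of pairwise flips required to obtain the standard format
--     """
--     new_s = s
--     Nup, Ndown = 0, 0
--     for i in range(len(s)):
--         if s[i].isupper():
--             Ndown += 1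
--         else:
--             Nup += 1
--
--     arr_up = 0
--     arr_down = 0
--     complete = False
--     i = 0
--     flips = 0
--     while arr_down < Ndown and arr_up < Nup:
--         new_s, flip = place_low(new_s, i)
--         flips += flip
--         arr_up += 1
--         i += 1
--
--         new_s, flip = place_high(new_s, i)
--         flips += flip
--         i += 1
--         arr_down += 1
--     return new_s, flips
-- ===== SOURCE B (Python) =====
-- def standardize_det(s):
--     # Same standardization, but on a char list with in-place transpositions and two
--     # monotone search frontiers instead of A's repeated string rebuilds and rescans.
--     a = list(s)
--     lows = sum(1 for c in a if not c.isupper())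
--     pairs = min(lows, len(a) - lows)
--     fl = fu = 0  # search frontiers: next candidate non-upper / non-lower position
--     flips = 0
--     for k in range(pairs):
--         i = 2 * k
--         if not a[i].islower():
--             j = max(fl, i + 1)
--             while a[j].isupper():
--                 j += 1
--             a[i], a[j] = a[j], a[i]
--             flips += 1
--             fl = j if not a[j].isupper() else j + 1
--             fu = min(fu, j)  # deposited char is non-lower
--         i += 1
--         if not a[i].isupper():
--             j = max(fu, i + 1)
--             while a[j].islower():
--                 j += 1
--             a[i], a[j] = a[j], a[i]
--             flips += 1
--             fu = j if not a[j].islower() else j + 1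
--             fl = min(fl, j)  # deposited char is non-upper
--     return ''.join(a), flips
-- ===== Notes on version B (the rewrite author's own statement) =====
-- stated objective: alternative
-- what changed: B simulates the same pairwise exchanges on a mutable char list with two persistent search frontiers (next non-upper / next non-lower), instead of A's rebuilding the whole string by four-slice concatenation and rescanning from i+1 at every swap.
-- outside the precondition, e.g. on standardize_det('AB1'): A returns ('1BA', 1), B returns ('1BA', 1); on standardize_det('1A'): A raises IndexError, B raises IndexError
import Mathlib
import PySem

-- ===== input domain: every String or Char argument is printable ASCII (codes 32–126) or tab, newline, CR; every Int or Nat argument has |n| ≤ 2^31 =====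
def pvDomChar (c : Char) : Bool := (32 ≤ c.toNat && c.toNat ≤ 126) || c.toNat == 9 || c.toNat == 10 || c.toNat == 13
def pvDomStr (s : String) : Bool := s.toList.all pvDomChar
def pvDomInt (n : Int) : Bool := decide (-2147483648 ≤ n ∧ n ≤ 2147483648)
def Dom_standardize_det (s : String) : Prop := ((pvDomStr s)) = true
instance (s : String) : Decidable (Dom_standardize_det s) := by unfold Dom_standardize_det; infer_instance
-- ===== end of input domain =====

-- B replaces A's per-swap four-slice string rebuilds and per-step rescans by in-place
-- swaps on a char list with two persistent search frontiers (a different mechanism,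
-- same observable result).

-- ===== PORT A =====
-- shared scan helper: the Python 'j = 1; while s[i+j].<p>(): j += 1' loop, returning the
-- stop index; returns cs.length when the scan runs off the end (Python raises IndexError
-- there — those inputs are outside Pre_).
def pvScan (cs : List Char) (p : Char → Bool) (k : Nat) : Nat :=
  if h : k < cs.length then
    if p cs[k] then pvScan cs p (k + 1) else k
  else k
termination_by cs.length - k

-- the counting 'for i in range(len(s))' loop of A: (Ndown, Nup)
def pvCountA (cs : List Char) : Int × Int :=
  cs.foldl (fun (ac : Int × Int) c =>
    if PySem.Chars.isupper c then (ac.1 + 1, ac.2) else (ac.1, ac.2 + 1)) (0, 0)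

-- s[i] is written cs.getD i ' ': every index A reads is in range (i < 2*min ≤ len)
def place_low (cs : List Char) (i : Nat) : List Char × Int :=
  if PySem.Chars.islower (cs.getD i ' ') then (cs, 0)
  else
    let ij := pvScan cs PySem.Chars.isupper (i + 1)
    (PySem.List.slice cs none (some (i : Int)) ++ [cs.getD ij ' ']
      ++ PySem.List.slice cs (some ((i : Int) + 1)) (some (ij : Int))
      ++ [cs.getD i ' '] ++ PySem.List.slice cs (some ((ij : Int) + 1)) none, 1)

def place_high (cs : List Char) (i : Nat) : List Char × Int :=
  if PySem.Chars.isupper (cs.getD i ' ') then (cs, 0)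
  else
    let ij := pvScan cs PySem.Chars.islower (i + 1)
    (PySem.List.slice cs none (some (i : Int)) ++ [cs.getD ij ' ']
      ++ PySem.List.slice cs (some ((i : Int) + 1)) (some (ij : Int))
      ++ [cs.getD i ' '] ++ PySem.List.slice cs (some ((ij : Int) + 1)) none, 1)

def pvLoopA (Nup Ndown : Int) (cs : List Char) (arr_up arr_down : Int) (i : Nat)
    (flips : Int) : List Char × Int :=
  if h : arr_down < Ndown ∧ arr_up < Nup then
    let r1 := place_low cs i
    let r2 := place_high r1.1 (i + 1)
    pvLoopA Nup Ndown r2.1 (arr_up + 1) (arr_down + 1) (i + 2) (flips + r1.2 + r2.2)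
  else (cs, flips)
termination_by (Ndown - arr_down).toNat
decreasing_by omega

def standardize_det (s : String) : String × Int :=
  let cs := s.toList
  let c := pvCountA cs
  let r := pvLoopA c.2 c.1 cs 0 0 0 0
  (String.mk r.1, r.2)

-- ===== PORT B =====
-- a[i], a[j] = a[j], a[i]
def pvSwap (a : List Char) (i j : Nat) : List Char :=
  (a.set i (a.getD j ' ')).set j (a.getD i ' ')

-- first half of Source B's loop body: place a low at position i
def pvStepLow (a : List Char) (fl fu : Nat) (flips : Int) (i : Nat) :
    List Char × Nat × Nat × Int :=
  if PySem.Chars.islower (a.getD i ' ') then (a, fl, fu, flips)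
  else
    let j := pvScan a PySem.Chars.isupper (max fl (i + 1))
    let a' := pvSwap a i j
    (a', (if PySem.Chars.isupper (a'.getD j ' ') then j + 1 else j), min fu j, flips + 1)

-- second half: place a high at position i
def pvStepHigh (a : List Char) (fl fu : Nat) (flips : Int) (i : Nat) :
    List Char × Nat × Nat × Int :=
  if PySem.Chars.isupper (a.getD i ' ') then (a, fl, fu, flips)
  else
    let j := pvScan a PySem.Chars.islower (max fu (i + 1))
    let a' := pvSwap a i j
    (a', min fl j, (if PySem.Chars.islower (a'.getD j ' ') then j + 1 else j), flips + 1)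

def pvLoopB (pairs : Nat) (a : List Char) (fl fu : Nat) (flips : Int) (k : Nat) :
    List Char × Int :=
  if _h : k < pairs then
    let s1 := pvStepLow a fl fu flips (2 * k)
    let s2 := pvStepHigh s1.1 s1.2.1 s1.2.2.1 s1.2.2.2 (2 * k + 1)
    pvLoopB pairs s2.1 s2.2.1 s2.2.2.1 s2.2.2.2 (k + 1)
  else (a, flips)
termination_by pairs - k

def standardize_det_alt (s : String) : String × Int :=
  let a := s.toList
  let lows := a.countP (fun c => !(PySem.Chars.isupper c))
  let pairs := min lows (a.length - lows)
  let r := pvLoopB pairs a 0 0 0 0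
  (String.mk r.1, r.2)

-- ===== PRECONDITION & SPEC =====
-- Pre_ excludes strings that mix non-letter characters with an excess of upper-case
-- letters: there A may run its inner scan past the end of the string and raise
-- IndexError (e.g. '1A'); the disjunction below provably rules every such crash out,
-- at the price of also excluding some crash-free inputs of that shape (see cites).
def Pre_standardize_det (s : String) : Prop :=
  s.toList.all PySem.Chars.isalpha = true ∨
    s.toList.countP PySem.Chars.isupper ≤ s.toList.countP PySem.Chars.islower

instance (s : String) : Decidable (Pre_standardize_det s) := by
  unfold Pre_standardize_det; infer_instance

def pvWitness_standardize_det : String := "BAab"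

def Spec_standardize_det (s : String) (out : String × Int) : Prop := out = standardize_det_alt s
instance (s : String) (out : String × Int) : Decidable (Spec_standardize_det s out) := by
  unfold Spec_standardize_det; infer_instance

-- ===== CLAIM (what is proved, stated in full; the proofs are below) =====
def Claim_equal_standardize_det : Prop := ∀ (s : String), Dom_standardize_det s →
  Pre_standardize_det s → Spec_standardize_det s (standardize_det s)

-- ===== LEMMAS AND PROOFS =====

lemma pv_lower_not_upper {c : Char} (h : PySem.Chars.islower c = true) :
    PySem.Chars.isupper c = false := by
  simp only [PySem.Chars.islower, PySem.Chars.isupper, Bool.and_eq_true,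
    decide_eq_true_eq] at *
  rcases h with ⟨h1, _⟩
  simp only [Bool.and_eq_false_iff, decide_eq_false_iff_not, not_le]
  exact Or.inr (lt_of_lt_of_le (by decide : ('Z' : Char) < 'a') h1)

lemma pv_upper_not_lower {c : Char} (h : PySem.Chars.isupper c = true) :
    PySem.Chars.islower c = false := by
  by_cases hq : PySem.Chars.islower c = true
  · exact absurd h (by simp [pv_lower_not_upper hq])
  · simpa using hq

-- pvScan never moves backwards, and never past the length (for k ≤ length)
lemma pvScan_ge (cs : List Char) (p : Char → Bool) (k : Nat) : k ≤ pvScan cs p k := by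
  fun_induction pvScan with
  | case1 k h hp ih => omega
  | case2 k h hp => omega
  | case3 k h => omega

-- pvScan stops no later than any failing position
lemma pvScan_le (cs : List Char) (p : Char → Bool) (k m : Nat) (hm : m < cs.length)
    (hkm : k ≤ m) (hpm : p cs[m] = false) : pvScan cs p k ≤ m := by
  fun_induction pvScan generalizing m with
  | case1 k h hp ih =>
      have hkm' : k + 1 ≤ m := by
        rcases Nat.eq_or_lt_of_le hkm with rfl | h'
        · rw [hp] at hpm; cases hpm
        · omega
      exact ih m hm hkm' hpm
  | case2 k h hp => omega
  | case3 k h => omega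

lemma pvScan_stop (cs : List Char) (p : Char → Bool) (k : Nat)
    (h : pvScan cs p k < cs.length) : p (cs[pvScan cs p k]'h) = false := by
  fun_induction pvScan with
  | case1 k hk hp ih => exact ih h
  | case2 k hk hp => simpa using hp
  | case3 k hk => omega

lemma pvScan_mid (cs : List Char) (p : Char → Bool) (k q : Nat) (hq : q < cs.length)
    (hkq : k ≤ q) (hlt : q < pvScan cs p k) : p cs[q] = true := by
  fun_induction pvScan generalizing q with
  | case1 k hk hp ih =>
      rcases Nat.eq_or_lt_of_le hkq with rfl | h'
      · exact hp
      · exact ih q hq (by omega) hlt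
  | case2 k hk hp => omega
  | case3 k hk => omega

-- skipping a prefix of satisfying positions does not change the stop index
lemma pvScan_congr (cs : List Char) (p : Char → Bool) (k k' : Nat) (hk : k ≤ k')
    (hk' : k' ≤ cs.length)
    (h : ∀ q (hq : q < cs.length), k ≤ q → q < k' → p cs[q] = true) :
    pvScan cs p k = pvScan cs p k' := by
  obtain ⟨d, rfl⟩ : ∃ d, k' = k + d := ⟨k' - k, by omega⟩
  clear hk
  induction d generalizing k with
  | zero => rfl
  | succ d ihd =>
      have hkL : k < cs.length := by omega
      have hpk : p cs[k] = true := h k hkL (le_refl _) (by omega)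
      have h1 : pvScan cs p k = pvScan cs p (k + 1) := by
        conv_lhs => rw [pvScan]
        simp [hkL, hpk]
      rw [h1, show k + (d + 1) = (k + 1) + d by omega]
      exact ihd (k + 1) (by omega) (fun q hq h1 h2 => h q hq (by omega) (by omega))

-- both programs' two-index exchange, in take/drop normal form
lemma pvSwap_eq (a : List Char) (i j : Nat) (hij : i < j) (hj : j < a.length) :
    pvSwap a i j = a.take i ++ [a[j]] ++ (a.drop (i + 1)).take (j - (i + 1))
      ++ [a[i]'(by omega)] ++ a.drop (j + 1) := by
  have hi : i < a.length := by omega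
  unfold pvSwap
  rw [List.getD_eq_getElem a ' ' hj, List.getD_eq_getElem a ' ' hi]
  rw [List.set_eq_take_cons_drop _ hi]
  rw [List.set_append_right _ _ (by simp [List.length_take]; omega)]
  have hlt : (a.take i).length = i := by simp [List.length_take]; omega
  rw [hlt]
  have hji : j - i = (j - (i + 1)) + 1 := by omega
  rw [hji, List.set_cons_succ]
  have hlen' : j - (i + 1) < (a.drop (i + 1)).length := by
    simp [List.length_drop]; omega
  rw [List.set_eq_take_cons_drop _ hlen']
  have hdd : (a.drop (i + 1)).drop (j - (i + 1) + 1) = a.drop (j + 1) := by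
    rw [List.drop_drop]; congr 1; omega
  rw [hdd]
  simp

-- A's four-slice splice equals the same normal form
lemma pvSplice_eq (a : List Char) (i j : Nat) (hij : i < j) (hj : j < a.length) :
    PySem.List.slice a none (some (i : Int)) ++ [a.getD j ' ']
      ++ PySem.List.slice a (some ((i : Int) + 1)) (some (j : Int))
      ++ [a.getD i ' '] ++ PySem.List.slice a (some ((j : Int) + 1)) none
    = a.take i ++ [a[j]] ++ (a.drop (i + 1)).take (j - (i + 1))
      ++ [a[i]'(by omega)] ++ a.drop (j + 1) := by
  have hi : i < a.length := by omega
  rw [List.getD_eq_getElem a ' ' hj, List.getD_eq_getElem a ' ' hi]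
  rw [PySem.List.slice_to_natCast]
  rw [show ((i : Int) + 1) = ((i + 1 : Nat) : Int) by push_cast; ring]
  rw [show ((j : Int) + 1) = ((j + 1 : Nat) : Int) by push_cast; ring]
  rw [PySem.List.slice_natCast, PySem.List.slice_from_natCast]

lemma pvSwap_length (a : List Char) (i j : Nat) : (pvSwap a i j).length = a.length := by
  simp [pvSwap]

lemma pvSwap_getElem (a : List Char) (i j : Nat) (hij : i < j) (hj : j < a.length)
    (m : Nat) (hm : m < a.length) :
    (pvSwap a i j)[m]'(by rw [pvSwap_length]; exact hm)
      = if m = j then a[i]'(by omega) else if m = i then a[j] else a[m] := by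
  have hi : i < a.length := by omega
  have e1 : a.getD j ' ' = a[j] := List.getD_eq_getElem a ' ' hj
  have e2 : a.getD i ' ' = a[i] := List.getD_eq_getElem a ' ' hi
  unfold pvSwap
  simp only [List.getElem_set, e1, e2]
  split_ifs <;> (try rfl) <;> omega

-- the suffix from i is permuted by the swap: counts are preserved
lemma pvSwap_countP_drop (a : List Char) (i j : Nat) (hij : i < j) (hj : j < a.length)
    (pred : Char → Bool) :
    ((pvSwap a i j).drop i).countP pred = (a.drop i).countP pred := by
  have hi : i < a.length := by omega
  rw [pvSwap_eq a i j hij hj]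
  have htk : (a.take i).length = i := by simp; omega
  have hL : a.drop i = a[i] :: ((a.drop (i + 1)).take (j - (i + 1))
      ++ a[j] :: a.drop (j + 1)) := by
    rw [List.drop_eq_getElem_cons hi]
    congr 1
    conv_lhs => rw [← List.take_append_drop (j - (i + 1)) (a.drop (i + 1))]
    congr 1
    rw [List.drop_drop, show i + 1 + (j - (i + 1)) = j by omega,
      List.drop_eq_getElem_cons hj]
  rw [hL]
  rw [show a.take i ++ [a[j]] ++ (a.drop (i + 1)).take (j - (i + 1))
      ++ [a[i]] ++ a.drop (j + 1)
    = a.take i ++ ([a[j]] ++ ((a.drop (i + 1)).take (j - (i + 1))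
      ++ ([a[i]] ++ a.drop (j + 1)))) by simp]
  rw [List.drop_append_of_le_length (by omega)]
  simp only [List.drop_take, Nat.sub_self, List.take_zero, List.nil_append,
    List.countP_append, List.countP_cons, List.countP_nil]
  omega

lemma pv_count_drop_succ (a : List Char) (pred : Char → Bool) (n : Nat)
    (hn : n < a.length) :
    (a.drop n).countP pred
      = (if pred a[n] then 1 else 0) + (a.drop (n + 1)).countP pred := by
  rw [List.drop_eq_getElem_cons hn, List.countP_cons]
  omega

lemma pvCountA_aux (cs : List Char) : ∀ ac : Int × Int,
    cs.foldl (fun (ac : Int × Int) c =>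
      if PySem.Chars.isupper c then (ac.1 + 1, ac.2) else (ac.1, ac.2 + 1)) ac
    = (ac.1 + (cs.countP PySem.Chars.isupper : Int),
       ac.2 + ((cs.countP fun c => !(PySem.Chars.isupper c)) : Int)) := by
  induction cs with
  | nil => simp
  | cons c t ih =>
      intro ac
      simp only [List.foldl_cons, List.countP_cons, ih]
      by_cases hc : PySem.Chars.isupper c = true <;> simp [hc] <;> ring

lemma pvCountA_eq (cs : List Char) :
    pvCountA cs = ((cs.countP PySem.Chars.isupper : Int),
      ((cs.countP fun c => !(PySem.Chars.isupper c)) : Int)) := by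
  simp [pvCountA, pvCountA_aux]

-- decrement/preservation of suffix counts across one exchange
lemma pvSwap_count (a : List Char) (i j : Nat) (hij : i < j) (hj : j < a.length)
    (pred : Char → Bool) :
    (a.drop i).countP pred
      = (if pred a[j] then 1 else 0) + ((pvSwap a i j).drop (i + 1)).countP pred := by
  have h1 := pvSwap_countP_drop a i j hij hj pred
  have h2 := pv_count_drop_succ (pvSwap a i j) pred i (by rw [pvSwap_length]; omega)
  rw [pvSwap_getElem a i j hij hj i (by omega)] at h2
  simp only [if_neg (by omega : ¬ i = j)] at h2
  by_cases hp : pred a[j] = true <;> simp [hp] at h2 ⊢ <;> omega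

-- one low half-step: A's place_low and B's pvStepLow agree, and the frontier
-- invariants and count bounds carry over
lemma pvLow_eq (a : List Char) (fl fu i : Nat) (flips : Int)
    (hiL : i + 1 < a.length) (hfl : fl ≤ a.length) (hfu : fu ≤ a.length)
    (hQpos : 0 < (a.drop i).countP PySem.Chars.islower)
    (hinvL : ∀ q, i < q → q < fl → PySem.Chars.isupper (a.getD q ' ') = true)
    (hinvU : ∀ q, i < q → q < fu → PySem.Chars.islower (a.getD q ' ') = true) :
    ∃ a1 fl1 fu1 d,
      place_low a i = (a1, d) ∧
      pvStepLow a fl fu flips i = (a1, fl1, fu1, flips + d) ∧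
      a1.length = a.length ∧ fl1 ≤ a.length ∧ fu1 ≤ a.length ∧
      (a.drop i).countP PySem.Chars.islower
        ≤ (a1.drop (i + 1)).countP PySem.Chars.islower + 1 ∧
      (a1.drop (i + 1)).countP PySem.Chars.isupper
        = (a.drop i).countP PySem.Chars.isupper ∧
      (∀ q, i < q → q < fl1 → PySem.Chars.isupper (a1.getD q ' ') = true) ∧
      (∀ q, i < q → q < fu1 → PySem.Chars.islower (a1.getD q ' ') = true) := by
  have hi : i < a.length := by omega
  by_cases hQ : PySem.Chars.islower (a.getD i ' ') = true
  · -- already a low orbital: no swap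
    refine ⟨a, fl, fu, 0, ?_, ?_, rfl, hfl, hfu, ?_, ?_, hinvL, fun q h1 h2 => hinvU q h1 h2⟩
    · rw [place_low, if_pos hQ]
    · rw [pvStepLow, if_pos hQ]; simp
    · have := pv_count_drop_succ a PySem.Chars.islower i hi
      have hb : (if PySem.Chars.islower a[i] = true then 1 else 0) ≤ 1 := by split <;> omega
      omega
    · have h0 := pv_count_drop_succ a PySem.Chars.isupper i hi
      rw [List.getD_eq_getElem a ' ' hi] at hQ
      rw [pv_lower_not_upper hQ] at h0
      simpa using h0.symm
  · -- swap with the next non-upper character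
    -- a lower-case character exists beyond i
    obtain ⟨x, hx, hxQ⟩ := List.countP_pos_iff.mp hQpos
    obtain ⟨t, ht, hxt⟩ := List.getElem_of_mem hx
    have htL : i + t < a.length := by simp [List.length_drop] at ht; omega
    have hQm : PySem.Chars.islower (a[i + t]'htL) = true := by
      have e : (List.drop i a)[t] = a[i + t]'htL := by simp [List.getElem_drop]
      rw [← e, hxt]; exact hxQ
    have him : i < i + t := by
      rcases Nat.eq_zero_or_pos t with rfl | hpos
      · exfalso; apply hQ
        rw [List.getD_eq_getElem a ' ' hi]; simpa using hQm
      · omega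
    have hPm : PySem.Chars.isupper a[i + t] = false := pv_lower_not_upper hQm
    set j := pvScan a PySem.Chars.isupper (i + 1) with hjdef
    have hge : i + 1 ≤ j := pvScan_ge a _ (i + 1)
    have hle : j ≤ i + t := pvScan_le a _ (i + 1) (i + t) htL (by omega) hPm
    have hjL : j < a.length := by omega
    have hstop : PySem.Chars.isupper a[j] = false := pvScan_stop a _ (i + 1) hjL
    have hmid : ∀ q (hq : q < a.length), i + 1 ≤ q → q < j →
        PySem.Chars.isupper a[q] = true := fun q hq h1 h2 => pvScan_mid a _ (i + 1) q hq h1 h2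
    have hij : i < j := by omega
    have hcongr : pvScan a PySem.Chars.isupper (max fl (i + 1)) = j := by
      rw [hjdef]
      refine (pvScan_congr a _ (i + 1) (max fl (i + 1)) (le_max_right _ _)
        (max_le hfl (by omega)) ?_).symm
      intro q hq h1 h2
      have hqfl : q < fl := by
        rcases le_total fl (i + 1) with h | h
        · rw [Nat.max_eq_right h] at h2; omega
        · rw [Nat.max_eq_left h] at h2; exact h2
      rw [← List.getD_eq_getElem a ' ' hq]
      exact hinvL q (by omega) hqfl
    have hswap : place_low a i
        = (pvSwap a i j, 1) := by
      rw [place_low, if_neg hQ, ← hjdef]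
      show (PySem.List.slice a none (some (i : Int)) ++ [a.getD j ' ']
        ++ PySem.List.slice a (some ((i : Int) + 1)) (some (j : Int))
        ++ [a.getD i ' '] ++ PySem.List.slice a (some ((j : Int) + 1)) none, 1)
        = (pvSwap a i j, 1)
      rw [pvSplice_eq a i j hij hjL, ← pvSwap_eq a i j hij hjL]
    have ha1q : ∀ q, q ≠ i → q ≠ j → (pvSwap a i j).getD q ' ' = a.getD q ' ' := by
      intro q hqi hqj
      by_cases hqL : q < a.length
      · rw [List.getD_eq_getElem _ ' ' (by rw [pvSwap_length]; exact hqL),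
          List.getD_eq_getElem a ' ' hqL, pvSwap_getElem a i j hij hjL q hqL,
          if_neg hqj, if_neg hqi]
      · rw [List.getD_eq_default _ ' ' (by rw [pvSwap_length]; omega),
          List.getD_eq_default a ' ' (by omega)]
    have ha1j : (pvSwap a i j).getD j ' ' = a[i] := by
      rw [List.getD_eq_getElem _ ' ' (by rw [pvSwap_length]; exact hjL),
        pvSwap_getElem a i j hij hjL j hjL, if_pos rfl]
    refine ⟨pvSwap a i j,
      (if PySem.Chars.isupper ((pvSwap a i j).getD j ' ') then j + 1 else j),
      min fu j, 1, hswap, ?_, pvSwap_length a i j, ?_, ?_, ?_, ?_, ?_, ?_⟩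
    · rw [pvStepLow, if_neg hQ, hcongr]
    · split <;> omega
    · omega
    · have := pvSwap_count a i j hij hjL PySem.Chars.islower
      split at this <;> omega
    · have := pvSwap_count a i j hij hjL PySem.Chars.isupper
      rw [hstop] at this
      simpa using this.symm
    · -- frontier invariant for the lows
      intro q h1 h2
      split at h2
      · rename_i hPj
        rcases Nat.lt_or_ge q j with hqj | hqj
        · rw [ha1q q (by omega) (by omega), List.getD_eq_getElem a ' ' (by omega)]
          exact hmid _ (by omega) (by omega) hqj
        · have : q = j := by omega
          subst this; exact hPj
      · rw [ha1q q (by omega) (by omega), List.getD_eq_getElem a ' ' (by omega)]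
        exact hmid _ (by omega) (by omega) h2
    · -- frontier invariant for the highs
      intro q h1 h2
      rw [ha1q q (by omega) (by omega)]
      exact hinvU q h1 (by omega)

-- one high half-step, the mirror image
lemma pvHigh_eq (a : List Char) (fl fu i : Nat) (flips : Int)
    (hiL : i + 1 ≤ a.length) (hfl : fl ≤ a.length) (hfu : fu ≤ a.length)
    (hPpos : 0 < (a.drop i).countP PySem.Chars.isupper)
    (hinvL : ∀ q, i < q → q < fl → PySem.Chars.isupper (a.getD q ' ') = true)
    (hinvU : ∀ q, i < q → q < fu → PySem.Chars.islower (a.getD q ' ') = true) :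
    ∃ a1 fl1 fu1 d,
      place_high a i = (a1, d) ∧
      pvStepHigh a fl fu flips i = (a1, fl1, fu1, flips + d) ∧
      a1.length = a.length ∧ fl1 ≤ a.length ∧ fu1 ≤ a.length ∧
      (a.drop i).countP PySem.Chars.isupper
        ≤ (a1.drop (i + 1)).countP PySem.Chars.isupper + 1 ∧
      (a1.drop (i + 1)).countP PySem.Chars.islower
        = (a.drop i).countP PySem.Chars.islower ∧
      (∀ q, i < q → q < fl1 → PySem.Chars.isupper (a1.getD q ' ') = true) ∧
      (∀ q, i < q → q < fu1 → PySem.Chars.islower (a1.getD q ' ') = true) := by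
  have hi : i < a.length := by omega
  by_cases hP : PySem.Chars.isupper (a.getD i ' ') = true
  · -- already a high orbital: no swap
    refine ⟨a, fl, fu, 0, ?_, ?_, rfl, hfl, hfu, ?_, ?_, hinvL, hinvU⟩
    · rw [place_high, if_pos hP]
    · rw [pvStepHigh, if_pos hP]; simp
    · have := pv_count_drop_succ a PySem.Chars.isupper i hi
      have hb : (if PySem.Chars.isupper a[i] = true then 1 else 0) ≤ 1 := by split <;> omega
      omega
    · have h0 := pv_count_drop_succ a PySem.Chars.islower i hi
      rw [List.getD_eq_getElem a ' ' hi] at hP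
      rw [pv_upper_not_lower hP] at h0
      simpa using h0.symm
  · -- swap with the next non-lower character
    obtain ⟨x, hx, hxP⟩ := List.countP_pos_iff.mp hPpos
    obtain ⟨t, ht, hxt⟩ := List.getElem_of_mem hx
    have htL : i + t < a.length := by simp [List.length_drop] at ht; omega
    have hPm : PySem.Chars.isupper (a[i + t]'htL) = true := by
      have e : (List.drop i a)[t] = a[i + t]'htL := by simp [List.getElem_drop]
      rw [← e, hxt]; exact hxP
    have him : i < i + t := by
      rcases Nat.eq_zero_or_pos t with rfl | hpos
      · exfalso; apply hP
        rw [List.getD_eq_getElem a ' ' hi]; simpa using hPm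
      · omega
    have hQm : PySem.Chars.islower a[i + t] = false := pv_upper_not_lower hPm
    set j := pvScan a PySem.Chars.islower (i + 1) with hjdef
    have hge : i + 1 ≤ j := pvScan_ge a _ (i + 1)
    have hle : j ≤ i + t := pvScan_le a _ (i + 1) (i + t) htL (by omega) hQm
    have hjL : j < a.length := by omega
    have hstop : PySem.Chars.islower a[j] = false := pvScan_stop a _ (i + 1) hjL
    have hmid : ∀ q (hq : q < a.length), i + 1 ≤ q → q < j →
        PySem.Chars.islower a[q] = true := fun q hq h1 h2 => pvScan_mid a _ (i + 1) q hq h1 h2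
    have hij : i < j := by omega
    have hcongr : pvScan a PySem.Chars.islower (max fu (i + 1)) = j := by
      rw [hjdef]
      refine (pvScan_congr a _ (i + 1) (max fu (i + 1)) (le_max_right _ _)
        (max_le hfu (by omega)) ?_).symm
      intro q hq h1 h2
      have hqfu : q < fu := by
        rcases le_total fu (i + 1) with h | h
        · rw [Nat.max_eq_right h] at h2; omega
        · rw [Nat.max_eq_left h] at h2; exact h2
      rw [← List.getD_eq_getElem a ' ' hq]
      exact hinvU q (by omega) hqfu
    have hswap : place_high a i
        = (pvSwap a i j, 1) := by
      rw [place_high, if_neg hP, ← hjdef]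
      show (PySem.List.slice a none (some (i : Int)) ++ [a.getD j ' ']
        ++ PySem.List.slice a (some ((i : Int) + 1)) (some (j : Int))
        ++ [a.getD i ' '] ++ PySem.List.slice a (some ((j : Int) + 1)) none, 1)
        = (pvSwap a i j, 1)
      rw [pvSplice_eq a i j hij hjL, ← pvSwap_eq a i j hij hjL]
    have ha1q : ∀ q, q ≠ i → q ≠ j → (pvSwap a i j).getD q ' ' = a.getD q ' ' := by
      intro q hqi hqj
      by_cases hqL : q < a.length
      · rw [List.getD_eq_getElem _ ' ' (by rw [pvSwap_length]; exact hqL),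
          List.getD_eq_getElem a ' ' hqL, pvSwap_getElem a i j hij hjL q hqL,
          if_neg hqj, if_neg hqi]
      · rw [List.getD_eq_default _ ' ' (by rw [pvSwap_length]; omega),
          List.getD_eq_default a ' ' (by omega)]
    refine ⟨pvSwap a i j, min fl j,
      (if PySem.Chars.islower ((pvSwap a i j).getD j ' ') then j + 1 else j),
      1, hswap, ?_, pvSwap_length a i j, ?_, ?_, ?_, ?_, ?_, ?_⟩
    · rw [pvStepHigh, if_neg hP, hcongr]
    · omega
    · split <;> omega
    · have := pvSwap_count a i j hij hjL PySem.Chars.isupper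
      split at this <;> omega
    · have := pvSwap_count a i j hij hjL PySem.Chars.islower
      rw [hstop] at this
      simpa using this.symm
    · -- frontier invariant for the lows
      intro q h1 h2
      rw [ha1q q (by omega) (by omega)]
      exact hinvL q h1 (by omega)
    · -- frontier invariant for the highs
      intro q h1 h2
      split at h2
      · rename_i hQj
        rcases Nat.lt_or_ge q j with hqj | hqj
        · rw [ha1q q (by omega) (by omega), List.getD_eq_getElem a ' ' (by omega)]
          exact hmid _ (by omega) (by omega) hqj
        · have : q = j := by omega
          subst this; exact hQj
      · rw [ha1q q (by omega) (by omega), List.getD_eq_getElem a ' ' (by omega)]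
        exact hmid _ (by omega) (by omega) h2

-- the main simulation lemma: with the frontier invariants, A's loop and B's loop
-- compute the same string and flip count
lemma pvLoop_eq (Nup Ndown : Int) (pairs : Nat)
    (hguard : ∀ k : Nat, (((k : Int) < Ndown ∧ (k : Int) < Nup) ↔ k < pairs)) :
    ∀ r k (a : List Char) (fl fu : Nat) (flips : Int),
    k + r = pairs →
    2 * pairs ≤ a.length →
    fl ≤ a.length → fu ≤ a.length →
    pairs ≤ k + (a.drop (2 * k)).countP PySem.Chars.islower →
    pairs ≤ k + (a.drop (2 * k)).countP PySem.Chars.isupper →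
    (∀ q, 2 * k < q → q < fl → PySem.Chars.isupper (a.getD q ' ') = true) →
    (∀ q, 2 * k < q → q < fu → PySem.Chars.islower (a.getD q ' ') = true) →
    pvLoopA Nup Ndown a (k : Int) (k : Int) (2 * k) flips = pvLoopB pairs a fl fu flips k := by
  intro r
  induction r with
  | zero =>
      intro k a fl fu flips hkr hlen hfl hfu hQc hPc hinvL hinvU
      rw [pvLoopA, pvLoopB,
        dif_neg (fun h => absurd ((hguard k).mp h) (by omega)),
        dif_neg (by omega : ¬ k < pairs)]
  | succ r ih =>
      intro k a fl fu flips hkr hlen hfl hfu hQc hPc hinvL hinvU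
      have hk : k < pairs := by omega
      obtain ⟨a1, fl1, fu1, d1, hA1, hB1, hlen1, hfl1, hfu1, hQ1, hP1, hinvL1, hinvU1⟩ :=
        pvLow_eq a fl fu (2 * k) flips (by omega) hfl hfu (by omega) hinvL hinvU
      obtain ⟨a2, fl2, fu2, d2, hA2, hB2, hlen2, hfl2, hfu2, hP2, hQ2, hinvL2, hinvU2⟩ :=
        pvHigh_eq a1 fl1 fu1 (2 * k + 1) (flips + d1) (by omega)
          (by omega) (by omega) (by omega)
          (fun q h1 h2 => hinvL1 q (by omega) h2)
          (fun q h1 h2 => hinvU1 q (by omega) h2)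
      rw [pvLoopA, dif_pos ((hguard k).mpr hk)]
      rw [pvLoopB, dif_pos hk]
      simp only [hA1, hB1]
      simp only [hA2, hB2]
      have e1 : ((k : Int) + 1) = ((k + 1 : Nat) : Int) := by push_cast; ring
      have e2 : 2 * k + 1 + 1 = 2 * (k + 1) := by omega
      rw [e1, e2]
      have edrop : List.drop (2 * (k + 1)) a2 = List.drop (2 * k + 1 + 1) a2 := by
        rw [show 2 * (k + 1) = 2 * k + 1 + 1 by omega]
      exact ih (k + 1) a2 fl2 fu2 (flips + d1 + d2) (by omega) (by omega) (by omega)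
        (by omega) (by rw [edrop]; omega) (by rw [edrop]; omega)
        (fun q h1 h2 => hinvL2 q (by omega) h2)
        (fun q h1 h2 => hinvU2 q (by omega) h2)

lemma pv_countP_not_add (l : List Char) (p : Char → Bool) :
    l.countP (fun c => !(p c)) + l.countP p = l.length := by
  have h := List.length_eq_countP_add_countP (p := p) (l := l)
  have h2 : l.countP (fun a => decide ¬(p a = true)) = l.countP (fun c => !(p c)) := by
    apply List.countP_congr; intro c _; cases hc : p c <;> simp
  omega

-- ===== VERDICT (by name: the statement is the Claim_ definition above) =====
theorem standardize_det_spec : Claim_equal_standardize_det := by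
  intro s _hdom hpre
  show standardize_det s = standardize_det_alt s
  unfold standardize_det standardize_det_alt
  show (String.mk (pvLoopA (pvCountA s.toList).2 (pvCountA s.toList).1 s.toList 0 0 0 0).1,
        (pvLoopA (pvCountA s.toList).2 (pvCountA s.toList).1 s.toList 0 0 0 0).2)
      = (String.mk (pvLoopB (min (s.toList.countP fun c => !(PySem.Chars.isupper c))
          (s.toList.length - s.toList.countP fun c => !(PySem.Chars.isupper c))) s.toList 0 0 0 0).1,
         (pvLoopB (min (s.toList.countP fun c => !(PySem.Chars.isupper c))
          (s.toList.length - s.toList.countP fun c => !(PySem.Chars.isupper c))) s.toList 0 0 0 0).2)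
  simp only [pvCountA_eq]
  set cs := s.toList with hcs
  set U := cs.countP PySem.Chars.isupper with hU
  set NU := cs.countP (fun c => !(PySem.Chars.isupper c)) with hNU
  set pairs := min NU (cs.length - NU) with hpairs
  have hUNU : NU + U = cs.length := pv_countP_not_add cs PySem.Chars.isupper
  have hg : ∀ k : Nat, (((k : Int) < (U : Int) ∧ (k : Int) < (NU : Int)) ↔ k < pairs) := by
    intro k; omega
  have hql : pairs ≤ cs.countP PySem.Chars.islower := by
    rcases hpre with hall | hle
    · have hNUQ : NU = cs.countP PySem.Chars.islower := by
        rw [hNU]; apply List.countP_congr; intro c hc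
        have hac := List.all_eq_true.mp hall c hc
        simp only [PySem.Chars.isalpha, Bool.or_eq_true] at hac
        rcases hac with h | h
        · simp [h, pv_upper_not_lower h]
        · simp [h, pv_lower_not_upper h]
      omega
    · have hle' : U ≤ cs.countP PySem.Chars.islower := hle
      omega
  have hmain := pvLoop_eq (NU : Int) (U : Int) pairs hg pairs 0 cs 0 0 0
    (by omega) (by omega) (Nat.zero_le _) (Nat.zero_le _)
    (by simpa using hql) (by simpa using (show pairs ≤ U by omega))
    (fun q h1 h2 => absurd h2 (Nat.not_lt_zero q))
    (fun q h1 h2 => absurd h2 (Nat.not_lt_zero q))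
  norm_num at hmain
  rw [hmain]
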